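-- pv_equiv track=rewrite | github.com/furrepanther/jcodemunch-mcp | src/jcodemunch_mcp/encoding/generic.py | _collect_prefixes
-- ===== SOURCE A (Python) =====
-- def _collect_prefixes(samples: list[str], min_len: int = 6) -> dict[str, int]:
--     """Count path-like prefixes across samples for legend promotion."""
--     buckets: dict[str, int] = {}
--     for s in samples:
--         if not isinstance(s, str) or len(s) < min_len:
--             continue
--         pos = 0
--         while True:
--             nxt = min(
--                 (i for i in (s.find("/", pos + 1), s.find("\\", pos + 1)) if i > 0),
--                 default=-1,
--             )
--             if nxt < 0 or nxt >= len(s) - 1: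
--                 break
--             prefix = s[: nxt + 1]
--             if len(prefix) >= min_len:
--                 buckets[prefix] = buckets.get(prefix, 0) + 1
--             pos = nxt
--     return buckets
-- ===== SOURCE B (Python) =====
-- def _sep_chunks(s: str) -> list[str]:
--     """Split s into pieces, each ending with its separator; a trailing piece
--     without a separator is dropped."""
--     chunks: list[str] = []
--     cur = ""
--     for c in s:
--         cur += c
--         if c == "/" or c == "\\":
--             chunks.append(cur)
--             cur = ""
--     return chunks
--
--
-- def _collect_prefixes(samples: list[str], min_len: int = 6) -> dict[str, int]:
--     """Count path-like prefixes across samples for legend promotion."""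
--     # Stage 1: tokenize each qualifying string into separator-terminated chunks
--     # and accumulate them into the stream of qualifying prefixes.
--     stream: list[str] = []
--     for s in samples:
--         if isinstance(s, str) and len(s) >= min_len:
--             acc = ""
--             for chunk in _sep_chunks(s):
--                 acc += chunk
--                 if min_len <= len(acc) < len(s) and len(acc) > 1:
--                     stream.append(acc)
--     # Stage 2: count the stream.
--     buckets: dict[str, int] = {}
--     for p in stream:
--         buckets[p] = buckets.get(p, 0) + 1
--     return buckets
-- ===== Notes on version B (the rewrite author's own statement) =====
-- stated objective: alternative
-- what changed: Replace A's single-pass while-loop that repeatedly re-scans each string with s.find('/',pos+1)/s.find('\',pos+1) and a min/filter by a staged pipeline: first tokenize each qualifying string into separator-terminated chunks and accumulate them into a flat stream of qualifying prefixes (length between max(2,min_len) and len(s)-1), then count the stream into the dict in a second pass.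
import Mathlib
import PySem

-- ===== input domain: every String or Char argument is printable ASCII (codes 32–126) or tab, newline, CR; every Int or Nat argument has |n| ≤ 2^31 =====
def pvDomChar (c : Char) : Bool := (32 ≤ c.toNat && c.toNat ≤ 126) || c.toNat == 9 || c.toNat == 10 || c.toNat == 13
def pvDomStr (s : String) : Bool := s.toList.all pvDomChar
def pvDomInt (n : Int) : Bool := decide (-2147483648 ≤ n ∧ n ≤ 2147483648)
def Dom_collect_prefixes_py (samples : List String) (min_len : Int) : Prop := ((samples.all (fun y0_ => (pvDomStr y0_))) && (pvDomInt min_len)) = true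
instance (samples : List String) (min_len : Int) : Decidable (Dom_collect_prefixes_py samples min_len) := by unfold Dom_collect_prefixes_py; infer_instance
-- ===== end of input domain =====

-- B replaces A's while-loop of repeated find/min scans by a staged pipeline (tokenize into
-- separator-terminated chunks, accumulate into a flat stream of prefixes, then count the
-- stream in a second pass); objective: alternative, same return value.

-- ===== PORT A =====
-- min((i for i in (s.find("/", pos+1), s.find("\\", pos+1)) if i > 0), default=-1)
def pvSepNext (s : String) (pos : Nat) : Int :=
  PySem.List.minD
    (([PySem.Str.findFrom s "/" ((pos : Int) + 1),
       PySem.Str.findFrom s "\\" ((pos : Int) + 1)]).filter (fun i => decide (0 < i)))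
    (fun i => i) (-1)

-- A's 'while True' loop; fuel only makes the recursion structural (pos strictly increases and stays < len s)
def pvALoop (s : String) (min_len : Int) : Nat → Nat → PySem.Dict String Int → PySem.Dict String Int
  | 0, _, buckets => buckets
  | fuel + 1, pos, buckets =>
    let nxt := pvSepNext s pos
    if nxt < 0 ∨ PySem.Str.len s - 1 ≤ nxt then buckets
    else
      let pfx := PySem.Str.slice s none (some (nxt + 1))
      let buckets' := if min_len ≤ PySem.Str.len pfx then buckets.insert pfx (buckets.getD pfx 0 + 1) else buckets
      pvALoop s min_len fuel nxt.toNat buckets'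

def collect_prefixes_py (samples : List String) (min_len : Int) : List (String × Int) :=
  (samples.foldl
    (fun buckets s =>
      if PySem.Str.len s < min_len then buckets
      else pvALoop s min_len (s.toList.length + 1) 0 buckets)
    PySem.Dict.empty).items

-- ===== PORT B =====
-- _sep_chunks: split s into pieces each ending with its separator; the trailing
-- separator-free piece is dropped (the pending piece is List Char, a faithful
-- representation of the Python str built by '+=')
def pvSepChunks (s : String) : List (List Char) :=
  (s.toList.foldl
    (fun (p : List (List Char) × List Char) c =>
      let cur := p.2 ++ [c]
      if c == '/' || c == '\\' then (p.1 ++ [cur], ([] : List Char)) else (p.1, cur))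
    ([], [])).1

def collect_prefixes_py_alt (samples : List String) (min_len : Int) : List (String × Int) :=
  -- Stage 1 builds the stream of qualifying prefixes; Stage 2 counts it
  ((samples.foldl
      (fun st s =>
        if min_len ≤ PySem.Str.len s then
          ((pvSepChunks s).foldl
            (fun (p : List String × List Char) chunk =>
              let acc := p.2 ++ chunk
              if min_len ≤ (acc.length : Int) ∧ (acc.length : Int) < PySem.Str.len s ∧ 1 < acc.length then
                (p.1 ++ [String.ofList acc], acc)
              else (p.1, acc))
            (st, [])).1
        else st)
      []).foldl (fun (b : PySem.Dict String Int) p => b.insert p (b.getD p 0 + 1)) PySem.Dict.empty).items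

-- ===== PRECONDITION & SPEC =====
def Spec_collect_prefixes_py (samples : List String) (min_len : Int) (out : List (String × Int)) : Prop := out = collect_prefixes_py_alt samples min_len
instance (samples : List String) (min_len : Int) (out : List (String × Int)) : Decidable (Spec_collect_prefixes_py samples min_len out) := by unfold Spec_collect_prefixes_py; infer_instance

-- ===== CLAIM (what is proved, stated in full; the proofs are below) =====
def Claim_equal_collect_prefixes_py : Prop := ∀ (samples : List String) (min_len : Int), Dom_collect_prefixes_py samples min_len → Spec_collect_prefixes_py samples min_len (collect_prefixes_py samples min_len)

-- ===== LEMMAS AND PROOFS =====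

def pvIsSep (c : Char) : Bool := c == '/' || c == '\\'

-- the separator indices of cs strictly between pos and the last index, in increasing order
def pvInner (cs : List Char) (pos : Nat) : List Nat :=
  (List.range cs.length).filter (fun i => decide (pos < i) && decide (i + 1 < cs.length) && pvIsSep cs[i]!)

def pvStep (s : String) (min_len : Int) (b : PySem.Dict String Int) (i : Nat) : PySem.Dict String Int :=
  if min_len ≤ (i : Int) + 1 then
    let p := PySem.Str.slice s none (some ((i : Int) + 1))
    b.insert p (b.getD p 0 + 1)
  else b

lemma pvSingleton_prefix {c : Char} {l : List Char} : [c] <+: l ↔ l.head? = some c := by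
  constructor
  · rintro ⟨t, rfl⟩; rfl
  · intro h
    cases l with
    | nil => simp at h
    | cons x t => simp at h; exact ⟨t, by simp [h]⟩

lemma pvSingleton_infix {c : Char} {l : List Char} : [c] <:+: l ↔ c ∈ l := by
  constructor
  · intro h; exact List.singleton_sublist.mp h.sublist
  · intro h
    obtain ⟨p, q, rfl⟩ := List.append_of_mem h
    exact ⟨p, q, by simp⟩

lemma pvFind_eq_of_first {d : List Char} {c : Char} {m : Nat}
    (hc : d[m]? = some c) (hmin : ∀ j < m, d[j]? ≠ some c) :
    PySem.Chars.find d [c] = (m : Int) := by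
  have hmem : c ∈ d := by
    obtain ⟨hlt, he⟩ := List.getElem?_eq_some_iff.mp hc
    exact he ▸ List.getElem_mem hlt
  have hne : PySem.Chars.find d [c] ≠ -1 :=
    (PySem.Chars.find_ne_neg_one_iff _ _).mpr (pvSingleton_infix.mpr hmem)
  have hge := PySem.Chars.neg_one_le_find d [c]
  have h0 : 0 ≤ PySem.Chars.find d [c] := by omega
  obtain ⟨hpre, hlt2⟩ := PySem.Chars.find_spec h0
  have hdt : d[(PySem.Chars.find d [c]).toNat]? = some c := by
    have := pvSingleton_prefix.mp hpre
    rwa [List.head?_drop] at this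
  have : (PySem.Chars.find d [c]).toNat = m := by
    rcases lt_trichotomy (PySem.Chars.find d [c]).toNat m with h | h | h
    · exact absurd hdt (hmin _ h)
    · exact h
    · exact absurd (pvSingleton_prefix.mpr (by rwa [List.head?_drop])) (hlt2 m h)
  omega

lemma pvFind_neg {d : List Char} {c : Char} (h : c ∉ d) :
    PySem.Chars.find d [c] = -1 := by
  rw [PySem.Chars.find_eq_neg_one_iff]
  exact fun hi => h (pvSingleton_infix.mp hi)

lemma pvFind_at {d : List Char} {c : Char} (h : PySem.Chars.find d [c] ≠ -1) :
    d[(PySem.Chars.find d [c]).toNat]? = some c := by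
  have hge := PySem.Chars.neg_one_le_find d [c]
  have h0 : 0 ≤ PySem.Chars.find d [c] := by omega
  obtain ⟨hpre, -⟩ := PySem.Chars.find_spec h0
  have := pvSingleton_prefix.mp hpre
  rwa [List.head?_drop] at this

lemma pvSlashList : "/".toList = ['/'] := rfl

lemma pvBackslashList : "\\".toList = ['\\'] := rfl

lemma pvSepNext_spec (s : String) (pos : Nat) (hk : pos + 1 ≤ s.toList.length) :
    pvSepNext s pos =
      match (s.toList.drop (pos + 1)).findIdx? pvIsSep with
      | none => -1
      | some m => ((pos + 1 + m : Nat) : Int) := by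
  have hcast : (pos : Int) + 1 = ((pos + 1 : Nat) : Int) := by push_cast; ring
  have hf1 : PySem.Str.findFrom s "/" ((pos : Int) + 1) =
      (if PySem.Chars.find (s.toList.drop (pos + 1)) ['/'] = -1 then -1
       else ((pos + 1 : Nat) : Int) + PySem.Chars.find (s.toList.drop (pos + 1)) ['/']) := by
    rw [PySem.Str.findFrom_eq, hcast, PySem.Chars.findFrom_natCast _ _ (pos + 1) hk,
      pvSlashList]
  have hf2 : PySem.Str.findFrom s "\\" ((pos : Int) + 1) =
      (if PySem.Chars.find (s.toList.drop (pos + 1)) ['\\'] = -1 then -1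
       else ((pos + 1 : Nat) : Int) + PySem.Chars.find (s.toList.drop (pos + 1)) ['\\']) := by
    rw [PySem.Str.findFrom_eq, hcast, PySem.Chars.findFrom_natCast _ _ (pos + 1) hk,
      pvBackslashList]
  cases hI : (s.toList.drop (pos + 1)).findIdx? pvIsSep with
  | none =>
    have hall := List.findIdx?_eq_none_iff.mp hI
    have h1 : PySem.Chars.find (s.toList.drop (pos + 1)) ['/'] = -1 :=
      pvFind_neg (fun hm => by have := hall _ hm; simp [pvIsSep] at this)
    have h2 : PySem.Chars.find (s.toList.drop (pos + 1)) ['\\'] = -1 :=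
      pvFind_neg (fun hm => by have := hall _ hm; simp [pvIsSep] at this)
    unfold pvSepNext
    rw [hf1, hf2, h1, h2]
    simp [PySem.List.minD]
    rw [(PySem.List.min?_eq_none_iff ([] : List Int) (fun i => i)).mpr rfl]
    rfl
  | some m =>
    obtain ⟨hmlen, hpm, hmin⟩ := List.findIdx?_eq_some_iff_getElem.mp hI
    have hsep : (s.toList.drop (pos + 1))[m] = '/' ∨ (s.toList.drop (pos + 1))[m] = '\\' := by
      unfold pvIsSep at hpm
      rcases Bool.or_eq_true_iff.mp hpm with h | h
      · exact Or.inl (eq_of_beq h)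
      · exact Or.inr (eq_of_beq h)
    have hother : ∀ c' : Char, pvIsSep c' = true →
        PySem.Chars.find (s.toList.drop (pos + 1)) [c'] ≠ -1 →
        (m : Int) ≤ PySem.Chars.find (s.toList.drop (pos + 1)) [c'] := by
      intro c' hc' hne
      have hat := pvFind_at hne
      have hge := PySem.Chars.neg_one_le_find (s.toList.drop (pos + 1)) [c']
      by_contra hcon
      have hlt : (PySem.Chars.find (s.toList.drop (pos + 1)) [c']).toNat < m := by omega
      have hm2 := hmin _ hlt
      obtain ⟨hlt2, he⟩ := List.getElem?_eq_some_iff.mp hat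
      rw [he] at hm2
      exact hm2 hc'
    have hfirst : ∀ c' : Char, (s.toList.drop (pos + 1))[m] = c' →
        PySem.Chars.find (s.toList.drop (pos + 1)) [c'] = (m : Int) := by
      intro c' he
      refine pvFind_eq_of_first (by rw [List.getElem?_eq_some_iff]; exact ⟨hmlen, he⟩) ?_
      intro j hj hje
      obtain ⟨hjl, hjee⟩ := List.getElem?_eq_some_iff.mp hje
      have hm2 := hmin _ hj
      rw [hjee, ← he] at hm2
      exact hm2 hpm
    rcases hsep with he | he
    · have h1 := hfirst _ he
      unfold pvSepNext
      rw [hf1, hf2, h1]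
      have hm1 : ¬((m : Int) = -1) := by omega
      by_cases h2 : PySem.Chars.find (s.toList.drop (pos + 1)) ['\\'] = -1
      · rw [if_neg hm1, if_pos h2]
        simp only [List.filter_cons, List.filter_nil, decide_eq_true_eq]
        rw [if_pos (show (0 : Int) < ((pos + 1 : Nat) : Int) + (m : Int) by push_cast; omega),
          if_neg (show ¬((0 : Int) < -1) by omega)]
        simp only [PySem.List.minD, PySem.List.min?_id_cons, List.foldl_nil, Option.getD_some]
        push_cast; ring
      · have hle := hother '\\' (by decide) h2
        have hge := PySem.Chars.neg_one_le_find (s.toList.drop (pos + 1)) ['\\']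
        rw [if_neg hm1, if_neg h2]
        simp only [List.filter_cons, List.filter_nil, decide_eq_true_eq]
        rw [if_pos (show (0 : Int) < ((pos + 1 : Nat) : Int) + (m : Int) by push_cast; omega),
          if_pos (show (0 : Int) < ((pos + 1 : Nat) : Int) +
            PySem.Chars.find (s.toList.drop (pos + 1)) ['\\'] by push_cast; omega)]
        simp only [PySem.List.minD, PySem.List.min?_id_cons, List.foldl_cons, List.foldl_nil,
          Option.getD_some]
        rw [min_eq_left (by omega)]
        push_cast; ring
    · have h1 := hfirst _ he
      unfold pvSepNext
      rw [hf1, hf2, h1]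
      have hm1 : ¬((m : Int) = -1) := by omega
      by_cases h2 : PySem.Chars.find (s.toList.drop (pos + 1)) ['/'] = -1
      · rw [if_pos h2, if_neg hm1]
        simp only [List.filter_cons, List.filter_nil, decide_eq_true_eq]
        rw [if_neg (show ¬((0 : Int) < -1) by omega),
          if_pos (show (0 : Int) < ((pos + 1 : Nat) : Int) + (m : Int) by push_cast; omega)]
        simp only [PySem.List.minD, PySem.List.min?_id_cons, List.foldl_nil, Option.getD_some]
        push_cast; ring
      · have hle := hother '/' (by decide) h2
        have hge := PySem.Chars.neg_one_le_find (s.toList.drop (pos + 1)) ['/']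
        rw [if_neg h2, if_neg hm1]
        simp only [List.filter_cons, List.filter_nil, decide_eq_true_eq]
        rw [if_pos (show (0 : Int) < ((pos + 1 : Nat) : Int) +
            PySem.Chars.find (s.toList.drop (pos + 1)) ['/'] by push_cast; omega),
          if_pos (show (0 : Int) < ((pos + 1 : Nat) : Int) + (m : Int) by push_cast; omega)]
        simp only [PySem.List.minD, PySem.List.min?_id_cons, List.foldl_cons, List.foldl_nil,
          Option.getD_some]
        rw [min_eq_right (by omega)]
        push_cast; ring

lemma pvDropGet {cs : List Char} {k i : Nat} (hki : k ≤ i) (hi : i < cs.length) :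
    (cs.drop k)[i - k]? = some cs[i] := by
  rw [List.getElem?_drop]
  have he : k + (i - k) = i := by omega
  rw [he, List.getElem?_eq_getElem hi]

lemma pvInner_nil_none {cs : List Char} {pos : Nat}
    (h : (cs.drop (pos + 1)).findIdx? pvIsSep = none) : pvInner cs pos = [] := by
  unfold pvInner
  rw [List.filter_eq_nil_iff]
  intro i hi hP
  rw [List.mem_range] at hi
  simp only [Bool.and_eq_true, decide_eq_true_eq] at hP
  obtain ⟨⟨h1, h2⟩, h3⟩ := hP
  have hget := pvDropGet (show pos + 1 ≤ i by omega) hi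
  have hmem : cs[i] ∈ cs.drop (pos + 1) := by
    obtain ⟨hl, he⟩ := List.getElem?_eq_some_iff.mp hget
    exact he ▸ List.getElem_mem hl
  have hfalse := List.findIdx?_eq_none_iff.mp h _ hmem
  rw [getElem!_pos cs i hi, hfalse] at h3
  exact absurd h3 (by simp)

lemma pvInner_nil_last {cs : List Char} {pos m : Nat}
    (h : (cs.drop (pos + 1)).findIdx? pvIsSep = some m)
    (hlast : pos + 1 + m + 1 = cs.length) : pvInner cs pos = [] := by
  obtain ⟨hmlen, hpm, hmin⟩ := List.findIdx?_eq_some_iff_getElem.mp h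
  unfold pvInner
  rw [List.filter_eq_nil_iff]
  intro i hi hP
  rw [List.mem_range] at hi
  simp only [Bool.and_eq_true, decide_eq_true_eq] at hP
  obtain ⟨⟨h1, h2⟩, h3⟩ := hP
  have hoff : i - (pos + 1) < m := by omega
  have hget := pvDropGet (show pos + 1 ≤ i by omega) hi
  obtain ⟨hl, he⟩ := List.getElem?_eq_some_iff.mp hget
  have hm2 := hmin _ hoff
  rw [he] at hm2
  rw [getElem!_pos cs i hi] at h3
  exact hm2 h3

lemma pvInner_cons {cs : List Char} {pos m : Nat}
    (h : (cs.drop (pos + 1)).findIdx? pvIsSep = some m)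
    (hlt : pos + 1 + m + 1 < cs.length) :
    pvInner cs pos = (pos + 1 + m) :: pvInner cs (pos + 1 + m) := by
  obtain ⟨hmlen, hpm, hmin⟩ := List.findIdx?_eq_some_iff_getElem.mp h
  set j := pos + 1 + m with hjdef
  have hj : j < cs.length := by omega
  have hsepj : pvIsSep cs[j]! = true := by
    rw [getElem!_pos cs j hj]
    have he : (cs.drop (pos + 1))[m] = cs[j] := by
      rw [List.getElem_drop]
    rw [← he]
    exact hpm
  have hnosep : ∀ i, pos < i → i < j → i < cs.length → ¬ pvIsSep cs[i]! = true := by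
    intro i hi1 hi2 hi3 hsep
    have hoff : i - (pos + 1) < m := by omega
    have hget := pvDropGet (show pos + 1 ≤ i by omega) hi3
    obtain ⟨hl, he⟩ := List.getElem?_eq_some_iff.mp hget
    have hm2 := hmin _ hoff
    rw [he] at hm2
    rw [getElem!_pos cs i hi3] at hsep
    exact hm2 hsep
  have hrange : List.range cs.length =
      List.range (j + 1) ++ List.map (fun x => j + 1 + x) (List.range (cs.length - (j + 1))) := by
    rw [← List.range_add]
    congr 1
    omega
  unfold pvInner
  rw [hrange, List.filter_append, List.filter_append]
  have hfirstA : List.filter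
      (fun i => decide (pos < i) && decide (i + 1 < cs.length) && pvIsSep cs[i]!)
      (List.range (j + 1)) = [j] := by
    rw [List.range_succ, List.filter_append]
    have hnil : List.filter
        (fun i => decide (pos < i) && decide (i + 1 < cs.length) && pvIsSep cs[i]!)
        (List.range j) = [] := by
      rw [List.filter_eq_nil_iff]
      intro i hi hP
      rw [List.mem_range] at hi
      simp only [Bool.and_eq_true, decide_eq_true_eq] at hP
      obtain ⟨⟨h1, h2⟩, h3⟩ := hP
      exact hnosep i h1 hi (by omega) h3
    rw [hnil]
    simp only [List.filter_cons, List.filter_nil, Bool.and_eq_true, decide_eq_true_eq]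
    rw [if_pos ⟨⟨by omega, by omega⟩, hsepj⟩]
    simp
  have hfirstB : List.filter
      (fun i => decide (j < i) && decide (i + 1 < cs.length) && pvIsSep cs[i]!)
      (List.range (j + 1)) = [] := by
    rw [List.filter_eq_nil_iff]
    intro i hi hP
    rw [List.mem_range] at hi
    simp only [Bool.and_eq_true, decide_eq_true_eq] at hP
    omega
  have htail : List.filter
      (fun i => decide (pos < i) && decide (i + 1 < cs.length) && pvIsSep cs[i]!)
      (List.map (fun x => j + 1 + x) (List.range (cs.length - (j + 1)))) =
      List.filter
      (fun i => decide (j < i) && decide (i + 1 < cs.length) && pvIsSep cs[i]!)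
      (List.map (fun x => j + 1 + x) (List.range (cs.length - (j + 1)))) := by
    apply List.filter_congr
    intro x hx
    rw [List.mem_map] at hx
    obtain ⟨y, hy, rfl⟩ := hx
    have e1 : decide (pos < j + 1 + y) = true := by simp; omega
    have e2 : decide (j < j + 1 + y) = true := by simp; omega
    rw [e1, e2]
  rw [hfirstA, hfirstB, htail]
  simp

lemma pvSliceLen (s : String) (j : Nat) (hj : j + 1 ≤ s.toList.length) :
    PySem.Str.len (PySem.Str.slice s none (some ((j : Int) + 1))) = (j : Int) + 1 := by
  have hcast : ((j : Int) + 1) = ((j + 1 : Nat) : Int) := by push_cast; ring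
  rw [PySem.Str.len_eq, PySem.Str.toList_slice, PySem.Chars.slice_eq_listSlice, hcast,
    PySem.List.slice_to _ (by positivity), Int.toNat_natCast, List.length_take]
  push_cast
  omega

lemma pvALoop_eq (s : String) (min_len : Int) :
    ∀ (fuel pos : Nat) (b : PySem.Dict String Int), pos < s.toList.length →
      s.toList.length - pos ≤ fuel →
      pvALoop s min_len fuel pos b = (pvInner s.toList pos).foldl (pvStep s min_len) b := by
  intro fuel
  induction fuel with
  | zero => intro pos b h1 h2; omega
  | succ fuel ih =>
    intro pos b hpos hfuel
    have hk : pos + 1 ≤ s.toList.length := hpos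
    have hnext := pvSepNext_spec s pos hk
    cases hI : (s.toList.drop (pos + 1)).findIdx? pvIsSep with
    | none =>
      rw [hI] at hnext
      simp only at hnext
      rw [pvInner_nil_none hI]
      simp only [pvALoop, hnext, List.foldl_nil]
      rw [if_pos (Or.inl (show (-1 : Int) < 0 by omega))]
    | some m =>
      rw [hI] at hnext
      simp only at hnext
      obtain ⟨hmlen, -, -⟩ := List.findIdx?_eq_some_iff_getElem.mp hI
      rw [List.length_drop] at hmlen
      have hj : pos + 1 + m < s.toList.length := by omega
      by_cases hlast : pos + 1 + m + 1 = s.toList.length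
      · rw [pvInner_nil_last hI hlast]
        simp only [pvALoop, hnext, PySem.Str.len_eq, List.foldl_nil]
        have hcond : ((pos + 1 + m : Nat) : Int) < 0 ∨
            ((s.toList.length : Nat) : Int) - 1 ≤ ((pos + 1 + m : Nat) : Int) := by
          right
          have h1 : ((pos + 1 + m : Nat) : Int) = (pos : Int) + 1 + (m : Int) := by
            push_cast; ring
          have h2 : ((s.toList.length : Nat) : Int) = (pos : Int) + 1 + (m : Int) + 1 := by
            rw [← hlast]; push_cast; ring
          rw [h1, h2]; omega
        rw [if_pos hcond]
      · have hlt : pos + 1 + m + 1 < s.toList.length := by omega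
        rw [pvInner_cons hI hlt]
        simp only [pvALoop, hnext]
        have hcond : ¬(((pos + 1 + m : Nat) : Int) < 0 ∨
            PySem.Str.len s - 1 ≤ ((pos + 1 + m : Nat) : Int)) := by
          rw [PySem.Str.len_eq]
          have h1 : ((pos + 1 + m : Nat) : Int) = (pos : Int) + 1 + (m : Int) := by
            push_cast; ring
          have h2 : (pos : Int) + 1 + (m : Int) + 1 < ((s.toList.length : Nat) : Int) := by
            push_cast at h1
            omega
          rw [h1]
          omega
        rw [if_neg hcond]
        rw [pvSliceLen s (pos + 1 + m) (by omega)]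
        have htn : ((pos + 1 + m : Nat) : Int).toNat = pos + 1 + m := Int.toNat_natCast _
        rw [htn]
        rw [ih (pos + 1 + m) _ (by omega) (by omega)]
        rw [List.foldl_cons]
        unfold pvStep
        rfl

lemma pvA_string (s : String) (min_len : Int) (b : PySem.Dict String Int) :
    (if PySem.Str.len s < min_len then b
     else pvALoop s min_len (s.toList.length + 1) 0 b) =
    (pvInner s.toList 0).foldl (pvStep s min_len) b := by
  by_cases hml : PySem.Str.len s < min_len
  · rw [if_pos hml]
    rw [PySem.Str.len_eq] at hml
    have hskip : ∀ (acc : PySem.Dict String Int), ∀ i ∈ pvInner s.toList 0,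
        pvStep s min_len acc i = (fun (acc : PySem.Dict String Int) (_ : Nat) => acc) acc i := by
      intro acc i hi
      unfold pvInner at hi
      rw [List.mem_filter] at hi
      obtain ⟨-, hP⟩ := hi
      simp only [Bool.and_eq_true, decide_eq_true_eq] at hP
      obtain ⟨⟨-, h2⟩, -⟩ := hP
      unfold pvStep
      rw [if_neg (by omega)]
    rw [PySem.List.foldl_congr_mem _ _ _ _ hskip, PySem.List.foldl_ignore]
  · rw [if_neg hml]
    rcases Nat.eq_zero_or_pos s.toList.length with h0 | h0
    · have hempty : s.toList = [] := List.length_eq_zero_iff.mp h0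
      have hnext : pvSepNext s 0 = -1 := by
        unfold pvSepNext
        rw [PySem.Str.findFrom_eq, PySem.Str.findFrom_eq, hempty]
        decide
      rw [h0]
      simp only [pvALoop, hnext]
      rw [if_pos (Or.inl (show (-1 : Int) < 0 by omega))]
      unfold pvInner
      rw [hempty]
      simp
    · exact pvALoop_eq s min_len _ 0 b h0 (by omega)

-- ===== B-side: chunk/accumulate pipeline =====

-- recursive form of _sep_chunks' loop
def pvChunksR : List Char → List Char → List (List Char)
  | [], _ => []
  | c :: t, cur => if c == '/' || c == '\\' then (cur ++ [c]) :: pvChunksR t [] else pvChunksR t (cur ++ [c])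

lemma pvChunks_foldl : ∀ (cs : List Char) (out : List (List Char)) (cur : List Char),
    (cs.foldl
      (fun (p : List (List Char) × List Char) c =>
        let cur := p.2 ++ [c]
        if c == '/' || c == '\\' then (p.1 ++ [cur], ([] : List Char)) else (p.1, cur))
      (out, cur)).1 = out ++ pvChunksR cs cur := by
  intro cs
  induction cs with
  | nil => intro out cur; simp [pvChunksR]
  | cons c t ih =>
    intro out cur
    simp only [List.foldl_cons, pvChunksR]
    by_cases h : (c == '/' || c == '\\') = true
    · rw [if_pos h, if_pos h] at *
      rw [ih]
      simp
    · rw [if_neg h, if_neg h] at *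
      rw [ih]

lemma pvSepChunks_eq (s : String) : pvSepChunks s = pvChunksR s.toList [] := by
  unfold pvSepChunks
  rw [pvChunks_foldl]
  simp

-- the separator indices of cs, in increasing order
def pvSepIdx (cs : List Char) : List Nat :=
  (List.range cs.length).filter (fun i => pvIsSep cs[i]!)

-- Source B's length condition on a prefix of length n of a string of length L
abbrev pvCondLen (min_len L : Int) (n : Nat) : Prop :=
  min_len ≤ (n : Int) ∧ (n : Int) < L ∧ 1 < n

lemma pvSepIdx_cons (c : Char) (t : List Char) :
    pvSepIdx (c :: t) = (if pvIsSep c then [0] else []) ++ (pvSepIdx t).map (· + 1) := by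
  unfold pvSepIdx
  rw [show (c :: t).length = t.length + 1 from rfl, List.range_succ_eq_map,
    List.filter_cons, List.filter_map]
  have hpred : ((fun i => pvIsSep (c :: t)[i]!) ∘ Nat.succ) = (fun j => pvIsSep t[j]!) := by
    funext j
    simp [Function.comp]
  rw [hpred]
  have hmap : List.map Nat.succ (List.filter (fun j => pvIsSep t[j]!) (List.range t.length)) =
      (List.filter (fun j => pvIsSep t[j]!) (List.range t.length)).map (· + 1) := rfl
  by_cases h : pvIsSep c = true
  · rw [if_pos (by simpa [List.getElem!_cons_zero] using h), if_pos h, hmap]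
    rfl
  · rw [if_neg (by simpa [List.getElem!_cons_zero] using h), if_neg h, hmap]
    rfl

-- the inner fold step of B's stage-1 loop (named for the proofs; definitionally the port's lambda)
def pvBF (min_len L : Int) (p : List String × List Char) (chunk : List Char) : List String × List Char :=
  if min_len ≤ ((p.2 ++ chunk).length : Int) ∧ ((p.2 ++ chunk).length : Int) < L ∧ 1 < (p.2 ++ chunk).length then
    (p.1 ++ [String.ofList (p.2 ++ chunk)], p.2 ++ chunk)
  else (p.1, p.2 ++ chunk)

-- the accumulate-over-chunks stage produces exactly the prefixes ending at separator indices
lemma pvAccChunks (min_len L : Int) :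
    ∀ (cs cur acc : List Char) (st : List String),
    ((pvChunksR cs cur).foldl (pvBF min_len L) (st, acc)).1
    = st ++ ((pvSepIdx cs).filter
        (fun j => decide (pvCondLen min_len L (acc.length + cur.length + (j + 1))))).map
        (fun j => String.ofList (acc ++ cur ++ cs.take (j + 1))) := by
  intro cs
  induction cs with
  | nil =>
    intro cur acc st
    simp [pvChunksR, pvSepIdx]
  | cons c t ih =>
    intro cur acc st
    by_cases h : (c == '/' || c == '\\') = true
    · have hsep : pvIsSep c = true := h
      rw [show pvChunksR (c :: t) cur = (cur ++ [c]) :: pvChunksR t [] from by simp [pvChunksR, h]]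
      rw [List.foldl_cons]
      rw [show pvBF min_len L (st, acc) (cur ++ [c]) =
          (if min_len ≤ ((acc ++ (cur ++ [c])).length : Int) ∧
              ((acc ++ (cur ++ [c])).length : Int) < L ∧ 1 < (acc ++ (cur ++ [c])).length then
            (st ++ [String.ofList (acc ++ (cur ++ [c]))], acc ++ (cur ++ [c]))
          else (st, acc ++ (cur ++ [c]))) from rfl]
      rw [pvSepIdx_cons, if_pos hsep, List.singleton_append]
      have hiff : (min_len ≤ ((acc ++ (cur ++ [c])).length : Int) ∧
          ((acc ++ (cur ++ [c])).length : Int) < L ∧ 1 < (acc ++ (cur ++ [c])).length) ↔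
          pvCondLen min_len L (acc.length + cur.length + (0 + 1)) := by
        unfold pvCondLen
        simp only [List.length_append, List.length_cons, List.length_nil]
        push_cast
        omega
      have hq : ((fun j => decide (pvCondLen min_len L (acc.length + cur.length + (j + 1)))) ∘ (fun x => x + 1)) =
          (fun (j : Nat) => decide (pvCondLen min_len L ((acc ++ (cur ++ [c])).length + ([] : List Char).length + (j + 1)))) := by
        funext j
        simp only [Function.comp_apply]
        rw [decide_eq_decide]
        unfold pvCondLen
        simp only [List.length_append, List.length_cons, List.length_nil]
        push_cast
        omega
      have hg : ((fun j => String.ofList (acc ++ cur ++ (c :: t).take (j + 1))) ∘ (fun x => x + 1)) =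
          (fun (j : Nat) => String.ofList ((acc ++ (cur ++ [c])) ++ ([] : List Char) ++ t.take (j + 1))) := by
        funext j
        simp [Function.comp, List.take_succ_cons]
      rw [show (0 :: (pvSepIdx t).map (fun x => x + 1)) = [0] ++ (pvSepIdx t).map (fun x => x + 1) from rfl]
      rw [List.filter_append, List.filter_map, List.map_append, List.map_map, hq, hg]
      by_cases hc : min_len ≤ ((acc ++ (cur ++ [c])).length : Int) ∧
          ((acc ++ (cur ++ [c])).length : Int) < L ∧ 1 < (acc ++ (cur ++ [c])).length
      · rw [if_pos hc, ih [] (acc ++ (cur ++ [c])) (st ++ [String.ofList (acc ++ (cur ++ [c]))])]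
        rw [show List.filter (fun j => decide (pvCondLen min_len L (acc.length + cur.length + (j + 1)))) [0] = [0] from by
          simp only [List.filter_cons, List.filter_nil]
          rw [if_pos (decide_eq_true (hiff.mp hc))]]
        simp [List.take_succ_cons, List.append_assoc]
      · rw [if_neg hc, ih [] (acc ++ (cur ++ [c])) st]
        rw [show List.filter (fun j => decide (pvCondLen min_len L (acc.length + cur.length + (j + 1)))) [0] = [] from by
          simp only [List.filter_cons, List.filter_nil]
          rw [if_neg (by simpa using fun hx => hc (hiff.mpr hx))]]
        simp
    · have hsep : pvIsSep c = false := by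
        unfold pvIsSep
        simpa using h
      rw [show pvChunksR (c :: t) cur = pvChunksR t (cur ++ [c]) from by simp [pvChunksR, h]]
      rw [ih (cur ++ [c]) acc st]
      have hq : ((fun j => decide (pvCondLen min_len L (acc.length + cur.length + (j + 1)))) ∘ (fun x => x + 1)) =
          (fun (j : Nat) => decide (pvCondLen min_len L (acc.length + (cur ++ [c]).length + (j + 1)))) := by
        funext j
        simp only [Function.comp_apply]
        rw [decide_eq_decide]
        unfold pvCondLen
        simp only [List.length_append, List.length_cons, List.length_nil]
        push_cast
        omega
      have hg : ((fun j => String.ofList (acc ++ cur ++ (c :: t).take (j + 1))) ∘ (fun x => x + 1)) =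
          (fun (j : Nat) => String.ofList (acc ++ (cur ++ [c]) ++ t.take (j + 1))) := by
        funext j
        simp [Function.comp, List.take_succ_cons]
      rw [pvSepIdx_cons, if_neg (by simp [hsep]), List.nil_append,
        List.filter_map, List.map_map, hq, hg]

-- stream contribution of one string, characterised through pvInner
def pvStreamOf (min_len : Int) (s : String) : List String :=
  ((pvInner s.toList 0).filter (fun (i : Nat) => decide (min_len ≤ (i : Int) + 1))).map
    (fun (i : Nat) => String.ofList (s.toList.take (i + 1)))

lemma pvFilter_inner (cs : List Char) (min_len : Int) :
    (pvSepIdx cs).filter (fun j => decide (pvCondLen min_len (cs.length : Int) (0 + 0 + (j + 1)))) =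
    (pvInner cs 0).filter (fun (i : Nat) => decide (min_len ≤ (i : Int) + 1)) := by
  unfold pvSepIdx pvInner
  rw [List.filter_filter, List.filter_filter]
  apply List.filter_congr
  intro i hi
  rw [List.mem_range] at hi
  rw [Bool.eq_iff_iff]
  simp only [Bool.and_eq_true, decide_eq_true_eq, pvCondLen]
  constructor
  · rintro ⟨⟨h1, h2, h3⟩, h4⟩
    exact ⟨by omega, ⟨by omega, by omega⟩, h4⟩
  · rintro ⟨h1, ⟨h2, h3⟩, h4⟩
    exact ⟨⟨by omega, by omega, by omega⟩, h4⟩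

lemma pvStream_nil {min_len : Int} {s : String} (hg : ¬ min_len ≤ PySem.Str.len s) :
    pvStreamOf min_len s = [] := by
  unfold pvStreamOf
  have hnil : (pvInner s.toList 0).filter (fun (i : Nat) => decide (min_len ≤ (i : Int) + 1)) = [] := by
    rw [List.filter_eq_nil_iff]
    intro i hi hd
    unfold pvInner at hi
    rw [List.mem_filter] at hi
    obtain ⟨-, hP⟩ := hi
    simp only [Bool.and_eq_true, decide_eq_true_eq] at hP hd
    obtain ⟨⟨-, h2⟩, -⟩ := hP
    rw [PySem.Str.len_eq] at hg
    omega
  rw [hnil, List.map_nil]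

lemma pvBstep_eq (min_len : Int) (s : String) (st : List String) :
    (if min_len ≤ PySem.Str.len s then
        ((pvSepChunks s).foldl
          (fun (p : List String × List Char) chunk =>
            let acc := p.2 ++ chunk
            if min_len ≤ (acc.length : Int) ∧ (acc.length : Int) < PySem.Str.len s ∧ 1 < acc.length then
              (p.1 ++ [String.ofList acc], acc)
            else (p.1, acc))
          (st, [])).1
      else st) = st ++ pvStreamOf min_len s := by
  by_cases hg : min_len ≤ PySem.Str.len s
  · rw [if_pos hg, pvSepChunks_eq]
    rw [show (fun (p : List String × List Char) chunk =>
          let acc := p.2 ++ chunk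
          if min_len ≤ (acc.length : Int) ∧ (acc.length : Int) < PySem.Str.len s ∧ 1 < acc.length then
            (p.1 ++ [String.ofList acc], acc)
          else (p.1, acc)) = pvBF min_len (PySem.Str.len s) from by funext p chunk; rfl]
    rw [pvAccChunks min_len (PySem.Str.len s) s.toList [] [] st]
    unfold pvStreamOf
    rw [show (fun j => decide (pvCondLen min_len (PySem.Str.len s) (([] : List Char).length + ([] : List Char).length + (j + 1)))) =
        (fun (j : Nat) => decide (pvCondLen min_len ((s.toList.length : Int)) (0 + 0 + (j + 1)))) from by
      funext j
      rw [PySem.Str.len_eq]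
      exact rfl]
    rw [pvFilter_inner]
    rfl
  · rw [if_neg hg, pvStream_nil hg]
    simp

lemma pvSlice_ofList (s : String) (i : Nat) :
    PySem.Str.slice s none (some ((i : Int) + 1)) = String.ofList (s.toList.take (i + 1)) := by
  have ht : (PySem.Str.slice s none (some ((i : Int) + 1))).toList = s.toList.take (i + 1) := by
    rw [PySem.Str.toList_slice, PySem.Chars.slice_eq_listSlice,
      show ((i : Int) + 1) = ((i + 1 : Nat) : Int) from by push_cast; ring,
      PySem.List.slice_to_natCast]
  rw [← ht, String.ofList_toList]

lemma pvB_string (min_len : Int) (s : String) (b : PySem.Dict String Int) :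
    (pvStreamOf min_len s).foldl (fun b p => b.insert p (b.getD p 0 + 1)) b =
    (pvInner s.toList 0).foldl (pvStep s min_len) b := by
  unfold pvStreamOf
  rw [List.foldl_map]
  have hR : (pvInner s.toList 0).foldl (pvStep s min_len) b =
      ((pvInner s.toList 0).filter (fun (i : Nat) => decide (min_len ≤ (i : Int) + 1))).foldl
        (fun b (i : Nat) =>
          b.insert (PySem.Str.slice s none (some ((i : Int) + 1)))
            (b.getD (PySem.Str.slice s none (some ((i : Int) + 1))) 0 + 1)) b := by
    rw [← PySem.List.foldl_ite_eq_foldl_filter (fun (i : Nat) => min_len ≤ (i : Int) + 1)]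
    rfl
  rw [hR]
  apply PySem.List.foldl_congr_mem
  intro acc i hi
  rw [pvSlice_ofList]

lemma pvCount_flatMap (g : String → List String) (ls : List String) :
    ∀ (b : PySem.Dict String Int),
    (ls.flatMap g).foldl (fun b p => b.insert p (b.getD p 0 + 1)) b =
    ls.foldl (fun b s => (g s).foldl (fun b p => b.insert p (b.getD p 0 + 1)) b) b := by
  induction ls with
  | nil => intro b; rfl
  | cons s t ih =>
    intro b
    rw [List.flatMap_cons, List.foldl_append, List.foldl_cons, ih]

-- ===== VERDICT (by name: the statement is the Claim_ definition above) =====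
theorem collect_prefixes_py_spec : Claim_equal_collect_prefixes_py := by
  intro samples min_len _
  unfold Spec_collect_prefixes_py collect_prefixes_py collect_prefixes_py_alt
  congr 1
  have hstream : samples.foldl
      (fun st s =>
        if min_len ≤ PySem.Str.len s then
          ((pvSepChunks s).foldl
            (fun (p : List String × List Char) chunk =>
              let acc := p.2 ++ chunk
              if min_len ≤ (acc.length : Int) ∧ (acc.length : Int) < PySem.Str.len s ∧ 1 < acc.length then
                (p.1 ++ [String.ofList acc], acc)
              else (p.1, acc))
            (st, [])).1
        else st)
      [] = samples.flatMap (pvStreamOf min_len) := by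
    rw [PySem.List.foldl_congr_mem _ _ (fun st s => st ++ pvStreamOf min_len s) _
      (fun st s _ => pvBstep_eq min_len s st)]
    rw [PySem.List.foldl_append_eq_flatMap]
    rfl
  rw [hstream, pvCount_flatMap]
  exact PySem.List.foldl_congr_mem _ _ _ _
    (fun b s _ => (pvA_string s min_len b).trans (pvB_string min_len s b).symm)
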